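-- pv_equiv track=rewrite | github.com/elikrok/cmmc_tool | enhanced_features/vendor_manager.py | check_boundary_protection
-- ===== SOURCE A (Python) =====
-- from typing import Dict, List, Optional, Tuple
--
-- def check_boundary_protection(config_content: str) -> Dict:
--     """Check boundary protection for IOS."""
--     lines = config_content.lower().split('\n')
--
--     # Check for ACLs
--     acl_defined = any(line.startswith(('access-list', 'ip access-list')) for line in lines)
--     acl_applied = any('ip access-group' in line or 'access-class' in line for line in lines)
--
--     # Check for management ACL on VTY
--     mgmt_acl = any('access-class' in line for line in lines)
--
--     return {
--         'acls_present_and_applied': acl_defined and acl_applied,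
--         'mgmt_acl_signal': mgmt_acl,
--         'ssh_mgmt': True,  # Checked in access_control
--         'passed': acl_defined and acl_applied and mgmt_acl
--     }
-- ===== SOURCE B (Python) =====
-- def check_boundary_protection(config_content: str):
--     """Check boundary protection for IOS by searching the whole lowered text
--     directly (no splitting into lines): a line starts with a prefix iff the
--     text starts with it or '\n'+prefix occurs, and a newline-free substring
--     occurs in some line iff it occurs in the text."""
--     text = config_content.lower()
--     acl_defined = (text.startswith('access-list') or text.startswith('ip access-list')
--                    or '\naccess-list' in text or '\nip access-list' in text)
--     acl_applied = 'ip access-group' in text or 'access-class' in text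
--     mgmt_acl = 'access-class' in text
--     return {
--         'acls_present_and_applied': acl_defined and acl_applied,
--         'mgmt_acl_signal': mgmt_acl,
--         'ssh_mgmt': True,
--         'passed': acl_defined and acl_applied and mgmt_acl
--     }
-- ===== Notes on version B (the rewrite author's own statement) =====
-- stated objective: alternative
-- what changed: B never splits the text into lines: it decides each flag by whole-string searches on the lowered text, using text.startswith(p) or ' '+p occurring in the text for the line-start checks and plain substring membership for the newline-free patterns.
import Mathlib
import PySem

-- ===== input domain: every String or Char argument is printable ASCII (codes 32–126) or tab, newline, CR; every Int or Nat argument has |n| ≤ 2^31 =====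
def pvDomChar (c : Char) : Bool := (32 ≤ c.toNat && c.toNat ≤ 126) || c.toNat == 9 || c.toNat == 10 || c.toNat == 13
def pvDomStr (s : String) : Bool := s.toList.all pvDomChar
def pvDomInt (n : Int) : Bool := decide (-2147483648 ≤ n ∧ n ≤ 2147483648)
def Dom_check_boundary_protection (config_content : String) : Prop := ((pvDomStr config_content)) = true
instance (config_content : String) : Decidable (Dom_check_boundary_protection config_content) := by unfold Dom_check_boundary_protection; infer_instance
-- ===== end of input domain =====

-- B avoids splitting into lines altogether: it searches the whole lowered text, using '\n'+prefix for line starts (simpler, one string to scan).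

-- ===== PORT A =====
def check_boundary_protection (config_content : String) : List (String × Bool) :=
  let lines := ((PySem.Str.split? (PySem.Str.lower config_content) "\n").getD [])
  let acl_defined := lines.any (fun line => PySem.Str.startswith line "access-list" || PySem.Str.startswith line "ip access-list")
  let acl_applied := lines.any (fun line => PySem.Str.isIn "ip access-group" line || PySem.Str.isIn "access-class" line)
  let mgmt_acl := lines.any (fun line => PySem.Str.isIn "access-class" line)
  [("acls_present_and_applied", acl_defined && acl_applied),
   ("mgmt_acl_signal", mgmt_acl),
   ("ssh_mgmt", true),
   ("passed", acl_defined && acl_applied && mgmt_acl)]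

-- ===== PORT B =====
def check_boundary_protection_alt (config_content : String) : List (String × Bool) :=
  let text := PySem.Str.lower config_content
  let acl_defined := PySem.Str.startswith text "access-list" || PySem.Str.startswith text "ip access-list"
                     || PySem.Str.isIn "\naccess-list" text || PySem.Str.isIn "\nip access-list" text
  let acl_applied := PySem.Str.isIn "ip access-group" text || PySem.Str.isIn "access-class" text
  let mgmt_acl := PySem.Str.isIn "access-class" text
  [("acls_present_and_applied", acl_defined && acl_applied),
   ("mgmt_acl_signal", mgmt_acl),
   ("ssh_mgmt", true),
   ("passed", acl_defined && acl_applied && mgmt_acl)]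

-- ===== PRECONDITION & SPEC =====
def Spec_check_boundary_protection (config_content : String) (out : List (String × Bool)) : Prop := out = check_boundary_protection_alt config_content
instance (config_content : String) (out : List (String × Bool)) : Decidable (Spec_check_boundary_protection config_content out) := by unfold Spec_check_boundary_protection; infer_instance

-- ===== CLAIM (what is proved, stated in full; the proofs are below) =====
def Claim_equal_check_boundary_protection : Prop := ∀ (config_content : String), Dom_check_boundary_protection config_content → Spec_check_boundary_protection config_content (check_boundary_protection config_content)

-- ===== LEMMAS AND PROOFS =====

-- Proof-side model of splitting on '\n' (used only in the proofs below).
def linesOf : List Char → List (List Char)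
  | [] => [[]]
  | c :: rest => if c = '\n' then [] :: linesOf rest
                 else match linesOf rest with
                      | h :: t => (c :: h) :: t
                      | [] => [[c]]

theorem linesOf_ne_nil (cs : List Char) : linesOf cs ≠ [] := by
  cases cs with
  | nil => simp [linesOf]
  | cons c rest =>
    simp only [linesOf]
    split_ifs
    · simp
    · cases h : linesOf rest <;> simp

theorem go_eq : ∀ (fuel : Nat) (l cur : List Char) (acc : List (List Char)),
    l.length ≤ fuel →
    PySem.Chars.splitOn.go ['\n'] fuel l cur acc =
      acc.reverse ++ (match linesOf l with
                      | h :: t => (cur.reverse ++ h) :: t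
                      | [] => [cur.reverse]) := by
  intro fuel
  induction fuel with
  | zero =>
    intro l cur acc hl
    have : l = [] := List.length_eq_zero_iff.mp (Nat.le_zero.mp hl)
    subst this
    simp [PySem.Chars.splitOn.go, linesOf]
  | succ fuel ih =>
    intro l cur acc hl
    cases l with
    | nil => simp [PySem.Chars.splitOn.go, linesOf]
    | cons c rest =>
      by_cases hc : c = '\n'
      · subst hc
        have hpre : List.isPrefixOf ['\n'] ('\n' :: rest) = true := by
          simp [List.isPrefixOf]
        rw [show PySem.Chars.splitOn.go ['\n'] (fuel+1) ('\n' :: rest) cur acc =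
              PySem.Chars.splitOn.go ['\n'] fuel (List.drop (List.length ['\n']) ('\n' :: rest)) [] (cur.reverse :: acc) by
              simp [PySem.Chars.splitOn.go, hpre]]
        simp only [List.length_cons, List.length_nil, List.drop_succ_cons, List.drop_zero]
        rw [ih rest [] (cur.reverse :: acc) (by simpa using Nat.lt_succ_iff.mp (by simpa using hl))]
        obtain ⟨h, t, hht⟩ : ∃ h t, linesOf rest = h :: t := by
          cases hr : linesOf rest with
          | nil => exact absurd hr (linesOf_ne_nil rest)
          | cons h t => exact ⟨h, t, rfl⟩
        simp [linesOf, hht]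
      · have hpre : List.isPrefixOf ['\n'] (c :: rest) = false := by
          simp [List.isPrefixOf]
          intro h; exact absurd h.symm hc
        rw [show PySem.Chars.splitOn.go ['\n'] (fuel+1) (c :: rest) cur acc =
              PySem.Chars.splitOn.go ['\n'] fuel rest (c :: cur) acc by
              simp [PySem.Chars.splitOn.go, hpre]]
        rw [ih rest (c :: cur) acc (by simpa using Nat.lt_succ_iff.mp (by simpa using hl))]
        obtain ⟨h, t, hht⟩ : ∃ h t, linesOf rest = h :: t := by
          cases hr : linesOf rest with
          | nil => exact absurd hr (linesOf_ne_nil rest)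
          | cons h t => exact ⟨h, t, rfl⟩
        simp [linesOf, hc, hht]

theorem splitOn_eq_linesOf (cs : List Char) : PySem.Chars.splitOn cs ['\n'] = linesOf cs := by
  rw [PySem.Chars.splitOn, go_eq (cs.length + 1) cs [] [] (by omega)]
  obtain ⟨h, t, hht⟩ : ∃ h t, linesOf cs = h :: t := by
    cases hr : linesOf cs with
    | nil => exact absurd hr (linesOf_ne_nil cs)
    | cons h t => exact ⟨h, t, rfl⟩
  simp [hht]

-- A newline-free pattern is a prefix of h ++ '\n' :: r iff it is a prefix of h.
theorem prefix_across (p : List Char) (hp : '\n' ∉ p) :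
    ∀ (h r : List Char), (p <+: (h ++ '\n' :: r)) ↔ p <+: h := by
  induction p with
  | nil => intro h r; simp
  | cons a p' ih =>
    intro h r
    have ha : a ≠ '\n' := fun e => hp (e ▸ List.mem_cons_self)
    have hp' : '\n' ∉ p' := fun e => hp (List.mem_cons_of_mem _ e)
    cases h with
    | nil =>
      simp only [List.nil_append, List.cons_prefix_cons]
      constructor
      · rintro ⟨e, _⟩; exact absurd e ha
      · intro hpr; exact absurd (List.prefix_nil.mp hpr) (by simp)
    | cons b h' =>
      simp only [List.cons_append, List.cons_prefix_cons]
      exact and_congr_right (fun _ => (ih hp') h' r)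

-- A newline-free pattern is an infix of h ++ '\n' :: r iff it is an infix of h or of r.
theorem infix_across (p : List Char) (hp : '\n' ∉ p) :
    ∀ (h r : List Char), (p <:+: (h ++ '\n' :: r)) ↔ (p <:+: h ∨ p <:+: r) := by
  intro h r
  induction h with
  | nil =>
    simp only [List.nil_append, List.infix_cons_iff]
    constructor
    · rintro (hpr | hinf)
      · cases p with
        | nil => exact Or.inl (List.nil_infix)
        | cons a p' =>
          exact absurd (List.cons_prefix_cons.mp hpr).1 (fun e => hp (e ▸ List.mem_cons_self))
      · exact Or.inr hinf
    · rintro (hinf | hinf)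
      · rcases List.infix_nil.mp hinf with rfl
        exact Or.inl (List.nil_prefix)
      · exact Or.inr hinf
  | cons b h' ih =>
    simp only [List.cons_append, List.infix_cons_iff, List.infix_cons_iff (l₂ := h')]
    rw [ih]
    constructor
    · rintro (hpr | hinf | hinf)
      · left; left
        have := (prefix_across p hp h' r)
        cases p with
        | nil => exact List.nil_prefix
        | cons a p' =>
          rcases List.cons_prefix_cons.mp hpr with ⟨e, htail⟩
          have hp' : '\n' ∉ p' := fun m => hp (List.mem_cons_of_mem _ m)
          exact List.cons_prefix_cons.mpr ⟨e, (prefix_across p' hp' h' r).mp htail⟩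
      · left; right; exact hinf
      · right; exact hinf
    · rintro ((hpr | hinf) | hinf)
      · left
        cases p with
        | nil => exact List.nil_prefix
        | cons a p' =>
          rcases List.cons_prefix_cons.mp hpr with ⟨e, htail⟩
          have hp' : '\n' ∉ p' := fun m => hp (List.mem_cons_of_mem _ m)
          exact List.cons_prefix_cons.mpr ⟨e, (prefix_across p' hp' h' r).mpr htail⟩
      · right; left; exact hinf
      · right; right; exact hinf

-- '\n'::p occurs in h ++ '\n' :: r (h newline-free) iff p is a prefix of r or '\n'::p occurs in r.
theorem nl_infix (p : List Char) :
    ∀ (h r : List Char), '\n' ∉ h →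
      (('\n' :: p) <:+: (h ++ '\n' :: r) ↔ (p <+: r ∨ ('\n' :: p) <:+: r)) := by
  intro h
  induction h with
  | nil =>
    intro r _
    simp only [List.nil_append, List.infix_cons_iff, List.cons_prefix_cons]
    constructor
    · rintro (⟨_, hpr⟩ | hinf)
      · exact Or.inl hpr
      · exact Or.inr hinf
    · rintro (hpr | hinf)
      · exact Or.inl ⟨by trivial, hpr⟩
      · exact Or.inr hinf
  | cons b h' ih =>
    intro r hh
    have hb : b ≠ '\n' := fun e => hh (e ▸ List.mem_cons_self)
    have hh' : '\n' ∉ h' := fun m => hh (List.mem_cons_of_mem _ m)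
    simp only [List.cons_append, List.infix_cons_iff]
    rw [ih r hh']
    constructor
    · rintro (hpr | hrest)
      · exact absurd (List.cons_prefix_cons.mp hpr).1 (fun e => hb e.symm)
      · exact hrest
    · intro hrest; exact Or.inr hrest

-- '\n'::p cannot occur in a newline-free string.
theorem nl_not_infix (p cs : List Char) (hcs : '\n' ∉ cs) : ¬ (('\n' :: p) <:+: cs) :=
  fun hinf => hcs (hinf.subset List.mem_cons_self)

theorem linesOf_no_nl (cs : List Char) (h : '\n' ∉ cs) : linesOf cs = [cs] := by
  induction cs with
  | nil => rfl
  | cons c rest ih =>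
    have hc : c ≠ '\n' := fun e => h (e ▸ List.mem_cons_self)
    have hr : '\n' ∉ rest := fun m => h (List.mem_cons_of_mem _ m)
    simp [linesOf, hc, ih hr]

theorem linesOf_append_nl (h r : List Char) (hh : '\n' ∉ h) :
    linesOf (h ++ '\n' :: r) = h :: linesOf r := by
  induction h with
  | nil => simp [linesOf]
  | cons b h' ih =>
    have hb : b ≠ '\n' := fun e => hh (e ▸ List.mem_cons_self)
    have hh' : '\n' ∉ h' := fun m => hh (List.mem_cons_of_mem _ m)
    simp only [List.cons_append, linesOf, if_neg hb, ih hh']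

-- Decompose cs at its first newline, for strong induction.
theorem decomp_nl (cs : List Char) (h : '\n' ∈ cs) :
    ∃ h' r, cs = h' ++ '\n' :: r ∧ '\n' ∉ h' := by
  induction cs with
  | nil => cases h
  | cons c rest ih =>
    by_cases hc : c = '\n'
    · exact ⟨[], rest, by simp [hc], by simp⟩
    · have : '\n' ∈ rest := by
        rcases List.mem_cons.mp h with e | m
        · exact absurd e.symm hc
        · exact m
      obtain ⟨h', r, heq, hnn⟩ := ih this
      refine ⟨c :: h', r, by simp [heq], ?_⟩
      intro m
      rcases List.mem_cons.mp m with e | m2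
      · exact hc e.symm
      · exact hnn m2

theorem any_isIn (p : List Char) (hp : '\n' ∉ p) :
    ∀ (cs : List Char), (linesOf cs).any (fun l => PySem.Chars.isIn p l) = PySem.Chars.isIn p cs := by
  intro cs
  induction hn : cs.length using Nat.strong_induction_on generalizing cs with
  | _ n ih =>
  subst hn
  by_cases hmem : '\n' ∈ cs
  · obtain ⟨h, r, rfl, hh⟩ := decomp_nl cs hmem
    rw [linesOf_append_nl h r hh, List.any_cons,
        ih r.length (by simp; omega) r rfl]
    apply Bool.coe_iff_coe.mp
    simp only [Bool.or_eq_true, PySem.Chars.isIn_iff_infix]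
    exact (or_congr Iff.rfl Iff.rfl).trans (infix_across p hp h r).symm
  · rw [linesOf_no_nl cs hmem]; simp

theorem any_startswith (p : List Char) (hp : '\n' ∉ p) :
    ∀ (cs : List Char), (linesOf cs).any (fun l => PySem.Chars.startswith l p) =
      (PySem.Chars.startswith cs p || PySem.Chars.isIn ('\n' :: p) cs) := by
  intro cs
  induction hn : cs.length using Nat.strong_induction_on generalizing cs with
  | _ n ih =>
  subst hn
  by_cases hmem : '\n' ∈ cs
  · obtain ⟨h, r, rfl, hh⟩ := decomp_nl cs hmem
    rw [linesOf_append_nl h r hh, List.any_cons,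
        ih r.length (by simp; omega) r rfl]
    apply Bool.coe_iff_coe.mp
    simp only [Bool.or_eq_true, PySem.Chars.isIn_iff_infix, PySem.Chars.startswith_iff]
    rw [nl_infix p h r hh, prefix_across p hp h r]
  · rw [linesOf_no_nl cs hmem]
    simp only [List.any_cons, List.any_nil, Bool.or_false]
    apply Bool.coe_iff_coe.mp
    simp only [Bool.or_eq_true, PySem.Chars.isIn_iff_infix, PySem.Chars.startswith_iff]
    have := nl_not_infix p cs hmem
    tauto

theorem any_or_split {α : Type} (l : List α) (p q : α → Bool) :
    (l.any fun x => p x || q x) = (l.any p || l.any q) := by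
  induction l with
  | nil => rfl
  | cons x xs ih => cases hpx : p x <;> cases hqx : q x <;> simp [List.any_cons, ih, hpx, hqx]

theorem lines_eq (t : String) :
    ((PySem.Str.split? t "\n").getD []) = (linesOf t.toList).map String.ofList := by
  rw [PySem.Str.split?]
  have : PySem.Chars.split? t.toList "\n".toList = some (PySem.Chars.splitOn t.toList ['\n']) := by
    simp [PySem.Chars.split?]
  rw [show "\n".toList = ['\n'] from rfl] at this ⊢
  rw [this, splitOn_eq_linesOf]
  rfl

-- ===== VERDICT (by name: the statement is the Claim_ definition above) =====
theorem check_boundary_protection_spec : Claim_equal_check_boundary_protection := by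
  intro s _
  unfold Spec_check_boundary_protection check_boundary_protection check_boundary_protection_alt
  rw [lines_eq]
  simp only [List.any_map, Function.comp_def, PySem.Str.startswith_eq, PySem.Str.isIn_eq,
    String.toList_ofList, any_or_split]
  rw [any_isIn "ip access-group".toList (by decide),
      any_isIn "access-class".toList (by decide),
      any_startswith "access-list".toList (by decide),
      any_startswith "ip access-list".toList (by decide)]
  rw [show "\naccess-list".toList = '\n' :: "access-list".toList from rfl,
      show "\nip access-list".toList = '\n' :: "ip access-list".toList from rfl]
  have key : ∀ a b c d : Bool, ((a || c) || (b || d)) = (((a || b) || c) || d) := by decide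
  rw [key]
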